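-- pv_equiv track=rewrite | github.com/blackw4tch/crypto-experiments | 第一次/第三题/cipher1.py | getKeyRange
-- ===== SOURCE A (Python) =====
-- def getCipherGroup(keyLength, cipher):
--     cipherGroup = [[] for a in range(keyLength)]
--     count = 0
--     while count < len(cipher):
--         cipherGroup[(count) % keyLength] += [cipher[count]]
--         count += 1
--     return cipherGroup
--
-- def getKeyRange(keyLength, cipher):
--     cipherGroup = getCipherGroup(keyLength, cipher)
--     keyGroup = [[] for a in range(keyLength)]
--
--     count=0
--     for perCipherGroup in cipherGroup:
--         for keyTest in range(1,255):
--             for perCipher in perCipherGroup: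
--                 plainChar = perCipher^keyTest
--                 if plainChar not in range(32,127):
--                     break
--             else:
--                 keyGroup[count].append(keyTest)
--         count+=1
--
--     return keyGroup
-- ===== SOURCE B (Python) =====
-- def getKeyRange(keyLength, cipher):
--     # Byte-outer search: per column, intersect the per-byte sets of allowed keys
--     # instead of scanning all 254 keys against every byte.
--     cols = {}
--     for j, b in enumerate(cipher):
--         cols.setdefault(j % keyLength, []).append(b)
--     result = []
--     for i in range(keyLength):
--         cand = set(range(1, 255))
--         for b in cols.get(i, []):
--             cand &= {b ^ p for p in range(32, 127)}
--         result.append(sorted(cand))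
--     return result
-- ===== Notes on version B (the rewrite author's own statement) =====
-- stated objective: faster
-- what changed: Per column the key search is inverted: instead of looping over all keys 1..254 and scanning the column's bytes with an early break, B starts from the candidate set {1..254} and intersects it with each byte's set {b ^ p : 32 <= p < 127} of keys keeping that byte printable, then sorts; grouping is one dict-of-lists pass instead of A's indexed-list pass.
import Mathlib
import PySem

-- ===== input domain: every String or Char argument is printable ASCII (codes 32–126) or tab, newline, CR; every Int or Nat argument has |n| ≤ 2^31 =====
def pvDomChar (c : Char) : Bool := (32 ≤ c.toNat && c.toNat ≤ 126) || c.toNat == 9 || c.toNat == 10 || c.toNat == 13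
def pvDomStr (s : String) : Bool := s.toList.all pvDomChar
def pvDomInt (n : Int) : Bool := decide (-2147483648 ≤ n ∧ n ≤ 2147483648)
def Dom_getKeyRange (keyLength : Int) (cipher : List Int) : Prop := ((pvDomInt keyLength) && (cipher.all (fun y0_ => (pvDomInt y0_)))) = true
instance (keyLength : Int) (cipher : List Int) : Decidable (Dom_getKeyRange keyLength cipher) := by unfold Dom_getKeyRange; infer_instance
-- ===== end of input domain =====

-- B inverts A's per-column key search: a candidate-set intersection over the column's bytes
-- instead of a key loop with an early-break byte scan (measured faster by a constant factor).

-- ===== PORT A =====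
-- Python's `groups[i] += [c]` (negative index wraps; the out-of-range IndexError case is
-- excluded by Pre_, where List.modify's out-of-range no-op is never reached)
def pyAppendAt (xs : List (List Int)) (i : Int) (c : Int) : List (List Int) :=
  let j : Int := if i < 0 then i + xs.length else i
  xs.modify j.toNat (fun g => g ++ [c])

-- the `while count < len(cipher)` loop of getCipherGroup, as structural recursion on the rest of cipher
def getCipherGroupLoop (keyLength : Int) : List Int → Int → List (List Int) → List (List Int)
  | [], _, groups => groups
  | c :: rest, count, groups =>
      getCipherGroupLoop keyLength rest (count + 1) (pyAppendAt groups (PySem.Int.mod count keyLength) c)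

def getCipherGroup (keyLength : Int) (cipher : List Int) : List (List Int) :=
  getCipherGroupLoop keyLength cipher 0 ((PySem.List.pyRange 0 keyLength 1).map (fun _ => []))

-- A's inner `for perCipher in perCipherGroup: … break / else:` — true iff the loop finishes without break
def allPrintable (g : List Int) (keyTest : Int) : Bool :=
  match g with
  | [] => true
  | perCipher :: rest =>
      if 32 ≤ PySem.Int.bxor perCipher keyTest ∧ PySem.Int.bxor perCipher keyTest < 127
      then allPrintable rest keyTest else false

def getKeyRange (keyLength : Int) (cipher : List Int) : List (List Int) :=
  let cipherGroup := getCipherGroup keyLength cipher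
  let keyGroup : List (List Int) := (PySem.List.pyRange 0 keyLength 1).map (fun _ => [])
  (cipherGroup.foldl (fun (st : List (List Int) × Int) perCipherGroup =>
      ((PySem.List.pyRange 1 255 1).foldl (fun kg keyTest =>
          if allPrintable perCipherGroup keyTest then pyAppendAt kg st.2 keyTest else kg) st.1,
       st.2 + 1)) (keyGroup, 0)).1

-- ===== PORT B =====
def getKeyRange_alt (keyLength : Int) (cipher : List Int) : List (List Int) :=
  let cols := (PySem.List.enumerate cipher 0).foldl
    (fun d jb => d.modify (PySem.Int.mod jb.1 keyLength) [] (fun g => g ++ [jb.2]))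
    (PySem.Dict.empty : PySem.Dict Int (List Int))
  (PySem.List.pyRange 0 keyLength 1).foldl (fun result i =>
    let cand : PySem.Set Int := (cols.getD i []).foldl (fun cand b =>
        PySem.Set.inter cand
          (PySem.Set.ofList ((PySem.List.pyRange 32 127 1).map (fun p => PySem.Int.bxor b p))))
      (PySem.Set.ofList (PySem.List.pyRange 1 255 1))
    result ++ [PySem.List.sorted cand (fun x => x)]) []

-- ===== PRECONDITION & SPEC =====
-- Pre_ excludes exactly the inputs where A raises: keyLength ≤ 0 with a nonempty cipher
-- (ZeroDivisionError for keyLength = 0, IndexError for keyLength < 0).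
def Pre_getKeyRange (keyLength : Int) (cipher : List Int) : Prop :=
  1 ≤ keyLength ∨ cipher = []
instance (keyLength : Int) (cipher : List Int) : Decidable (Pre_getKeyRange keyLength cipher) := by
  unfold Pre_getKeyRange; infer_instance
def pvWitness_getKeyRange : Int × List Int := (2, [65, 10, 200])

def Spec_getKeyRange (keyLength : Int) (cipher : List Int) (out : List (List Int)) : Prop := out = getKeyRange_alt keyLength cipher
instance (keyLength : Int) (cipher : List Int) (out : List (List Int)) : Decidable (Spec_getKeyRange keyLength cipher out) := by unfold Spec_getKeyRange; infer_instance

-- ===== CLAIM (what is proved, stated in full; the proofs are below) =====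
def Claim_equal_getKeyRange : Prop := ∀ (keyLength : Int) (cipher : List Int), Dom_getKeyRange keyLength cipher → Pre_getKeyRange keyLength cipher → Spec_getKeyRange keyLength cipher (getKeyRange keyLength cipher)

-- ===== LEMMAS AND PROOFS =====

-- XOR involution: b ^ (b ^ k) = k
theorem pv_bxor_cancel (b k : Int) : PySem.Int.bxor b (PySem.Int.bxor b k) = k := by
  have h : ∀ (d : Nat), (-(-(d:Int) - 1) - 1) = d := fun d => by ring
  unfold PySem.Int.bxor
  by_cases hb : 0 ≤ b <;> by_cases hk : 0 ≤ k <;>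
    simp only [hb, hk, if_true, if_false] <;> split_ifs <;>
    (try simp only [h, Int.toNat_natCast, Nat.xor_xor_cancel_left]) <;> omega

-- the column of `cipher` at residue j (B's comprehension)
def pvCol (keyLength : Int) (cipher : List Int) (start j : Int) : List Int :=
  ((PySem.List.enumerate cipher start).filter
      (fun jb => PySem.Int.mod jb.1 keyLength == j)).map (fun jb => jb.2)

-- A's per-column key list
def pvKeysA (g : List Int) : List Int :=
  (PySem.List.pyRange 1 255 1).filter (fun k => allPrintable g k)

theorem pv_loop_length (keyLength : Int) (rest : List Int) :
    ∀ (count : Int) (groups : List (List Int)),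
    (getCipherGroupLoop keyLength rest count groups).length = groups.length := by
  induction rest with
  | nil => intro c g; rfl
  | cons x xs ih =>
      intro c g
      simp [getCipherGroupLoop, ih, pyAppendAt, List.length_modify]

theorem pv_loop_getD (keyLength : Int) (hkl : 1 ≤ keyLength) (rest : List Int) :
    ∀ (count : Int), 0 ≤ count → ∀ (groups : List (List Int)),
      groups.length = keyLength.toNat → ∀ (j : Nat), j < groups.length →
      (getCipherGroupLoop keyLength rest count groups).getD j []
        = groups.getD j [] ++ pvCol keyLength rest count (j : Int) := by
  induction rest with
  | nil =>
      intro count hc groups hlen j hj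
      simp [getCipherGroupLoop, pvCol, PySem.List.enumerate_nil]
  | cons x xs ih =>
      intro count hc groups hlen j hj
      have hmn : 0 ≤ PySem.Int.mod count keyLength := PySem.Int.mod_nonneg count (by omega)
      have hml : PySem.Int.mod count keyLength < keyLength := PySem.Int.mod_lt count (by omega)
      have happ : pyAppendAt groups (PySem.Int.mod count keyLength) x
          = groups.modify (PySem.Int.mod count keyLength).toNat (fun g => g ++ [x]) := by
        simp [pyAppendAt, Int.not_lt.mpr hmn]
      have hlen2 : (groups.modify (PySem.Int.mod count keyLength).toNat (fun g => g ++ [x])).length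
          = keyLength.toNat := by simp [List.length_modify, hlen]
      have hrec := ih (count + 1) (by omega)
        (groups.modify (PySem.Int.mod count keyLength).toNat (fun g => g ++ [x])) hlen2 j
        (by simp [List.length_modify]; omega)
      rw [show getCipherGroupLoop keyLength (x :: xs) count groups
            = getCipherGroupLoop keyLength xs (count + 1)
                (pyAppendAt groups (PySem.Int.mod count keyLength) x) from rfl, happ, hrec]
      have hgd : ∀ (l : List (List Int)) (n : Nat) (h : n < l.length), l.getD n [] = l[n] := by
        intro l n h; exact List.getD_eq_getElem l [] h
      rw [hgd _ j (by simp [List.length_modify]; omega), hgd groups j hj,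
          List.getElem_modify]
      have hcol : pvCol keyLength (x :: xs) count (j : Int)
          = (if PySem.Int.mod count keyLength == (j:Int) then x :: pvCol keyLength xs (count+1) (j:Int)
             else pvCol keyLength xs (count+1) (j:Int)) := by
        simp only [pvCol, PySem.List.enumerate_cons, List.filter_cons]
        split_ifs with h1 <;> simp_all
      rw [hcol]
      by_cases heq : (PySem.Int.mod count keyLength).toNat = j
      · have : PySem.Int.mod count keyLength = (j : Int) := by omega
        simp [this, List.append_assoc]
      · have : ¬ (PySem.Int.mod count keyLength = (j : Int)) := by omega
        simp [heq, this]

-- modifying the element after a known prefix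
theorem pv_modify_mid (pre t : List (List Int)) (cur : List Int) (f : List Int → List Int) :
    (pre ++ cur :: t).modify pre.length f = pre ++ f cur :: t := by
  induction pre with
  | nil => simp [List.modify]
  | cons p ps ih => simpa [List.modify] using ih

theorem pv_appendAt_mid (pre t : List (List Int)) (cur : List Int) (k : Int) :
    pyAppendAt (pre ++ cur :: t) (pre.length : Int) k = pre ++ (cur ++ [k]) :: t := by
  have : ¬ ((pre.length : Int) < 0) := by omega
  simp only [pyAppendAt, this, if_false, Int.toNat_natCast]
  exact pv_modify_mid pre t cur (fun g => g ++ [k])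

-- the inner key loop appends the filtered keys at the fixed index pre.length
theorem pv_inner_eq (p : Int → Bool) (ks : List Int) :
    ∀ (cur : List Int) (pre t : List (List Int)),
      ks.foldl (fun kg k => if p k then pyAppendAt kg (pre.length : Int) k else kg) (pre ++ cur :: t)
        = pre ++ (cur ++ ks.filter p) :: t := by
  induction ks with
  | nil => intro cur pre t; simp
  | cons k ks ih =>
      intro cur pre t
      by_cases hp : p k
      · simp only [List.foldl_cons, hp, if_true, pv_appendAt_mid, ih (cur ++ [k]) pre t,
          List.filter_cons, List.append_assoc]
        simp
      · simp only [List.foldl_cons, List.filter_cons, hp, if_false, Bool.false_eq_true,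
          ih cur pre t]

-- the outer loop over the groups is a map of pvKeysA
theorem pv_outer_eq (gs : List (List Int)) :
    ∀ (pre : List (List Int)),
      (gs.foldl (fun (st : List (List Int) × Int) g =>
          ((PySem.List.pyRange 1 255 1).foldl (fun kg keyTest =>
              if allPrintable g keyTest then pyAppendAt kg st.2 keyTest else kg) st.1,
           st.2 + 1)) (pre ++ List.replicate gs.length [], (pre.length : Int))).1
        = pre ++ gs.map pvKeysA := by
  induction gs with
  | nil => intro pre; simp
  | cons g gs ih =>
      intro pre
      have h1 : pre ++ List.replicate (g :: gs).length ([] : List Int)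
          = pre ++ ([] : List Int) :: List.replicate gs.length [] := by
        simp [List.replicate]
      rw [List.foldl_cons]
      have h2 : (PySem.List.pyRange 1 255 1).foldl (fun kg keyTest =>
            if allPrintable g keyTest then pyAppendAt kg (pre.length : Int) keyTest else kg)
            (pre ++ ([] : List Int) :: List.replicate gs.length [])
          = pre ++ pvKeysA g :: List.replicate gs.length [] := by
        simpa [pvKeysA] using pv_inner_eq (fun k => allPrintable g k) (PySem.List.pyRange 1 255 1)
          [] pre (List.replicate gs.length [])
      have h3 : pre ++ pvKeysA g :: List.replicate gs.length []
          = (pre ++ [pvKeysA g]) ++ List.replicate gs.length [] := by simp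
      have h4 : (pre.length : Int) + 1 = ((pre ++ [pvKeysA g]).length : Int) := by
        simp
      calc (List.foldl _ ((PySem.List.pyRange 1 255 1).foldl (fun kg keyTest =>
              if allPrintable g keyTest then pyAppendAt kg (pre.length : Int) keyTest else kg)
              (pre ++ List.replicate (g :: gs).length []), (pre.length : Int) + 1) gs).1
          = (List.foldl _ ((pre ++ [pvKeysA g]) ++ List.replicate gs.length [],
              ((pre ++ [pvKeysA g]).length : Int)) gs).1 := by rw [h1, h2, h3, h4]
        _ = (pre ++ [pvKeysA g]) ++ gs.map pvKeysA := ih (pre ++ [pvKeysA g])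
        _ = pre ++ (g :: gs).map pvKeysA := by simp

theorem pv_allPrintable_iff (g : List Int) (k : Int) :
    allPrintable g k = true ↔ ∀ b ∈ g, 32 ≤ PySem.Int.bxor b k ∧ PySem.Int.bxor b k < 127 := by
  induction g with
  | nil => simp [allPrintable]
  | cons b g ih =>
      by_cases hb : 32 ≤ PySem.Int.bxor b k ∧ PySem.Int.bxor b k < 127
      · simp [allPrintable, hb, ih]
      · simp [allPrintable, hb]

theorem pv_mem_keyset (b k : Int) :
    (k ∈ PySem.Set.ofList ((PySem.List.pyRange 32 127 1).map (fun p => PySem.Int.bxor b p)))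
      ↔ (32 ≤ PySem.Int.bxor b k ∧ PySem.Int.bxor b k < 127) := by
  rw [PySem.Set.mem_ofList]
  simp only [List.mem_map, PySem.List.mem_pyRange_one]
  constructor
  · rintro ⟨p, ⟨h1, h2⟩, rfl⟩
    rw [pv_bxor_cancel]; exact ⟨h1, h2⟩
  · rintro ⟨h1, h2⟩
    exact ⟨PySem.Int.bxor b k, ⟨h1, h2⟩, pv_bxor_cancel b k⟩

theorem pv_mem_cand (g : List Int) (k : Int) :
    ∀ (s : PySem.Set Int),
      (k ∈ g.foldl (fun cand b =>
          PySem.Set.inter cand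
            (PySem.Set.ofList ((PySem.List.pyRange 32 127 1).map (fun p => PySem.Int.bxor b p)))) s
       ↔ k ∈ s ∧ ∀ b ∈ g, 32 ≤ PySem.Int.bxor b k ∧ PySem.Int.bxor b k < 127) := by
  induction g with
  | nil => intro s; simp
  | cons b g ih =>
      intro s
      rw [List.foldl_cons, ih, PySem.Set.mem_inter, pv_mem_keyset]
      constructor
      · rintro ⟨⟨h1, h2⟩, h3⟩
        exact ⟨h1, by simpa using And.intro h2 h3⟩
      · rintro ⟨h1, h2⟩
        simp only [List.mem_cons] at h2
        exact ⟨⟨h1, h2 b (Or.inl rfl)⟩, fun b' hb' => h2 b' (Or.inr hb')⟩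

theorem pv_nodup_cand (g : List Int) :
    ∀ (s : PySem.Set Int), List.Nodup s →
      List.Nodup (g.foldl (fun cand b =>
          PySem.Set.inter cand
            (PySem.Set.ofList ((PySem.List.pyRange 32 127 1).map (fun p => PySem.Int.bxor b p)))) s) := by
  induction g with
  | nil => intro s hs; exact hs
  | cons b g ih =>
      intro s hs
      exact ih _ (PySem.Set.nodup_inter _ _ hs)

-- per column, B's sorted candidate set is A's key list
theorem pv_column_eq (g : List Int) :
    PySem.List.sorted
      (g.foldl (fun cand b =>
          PySem.Set.inter cand
            (PySem.Set.ofList ((PySem.List.pyRange 32 127 1).map (fun p => PySem.Int.bxor b p))))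
        (PySem.Set.ofList (PySem.List.pyRange 1 255 1))) (fun x => x)
      = pvKeysA g := by
  apply PySem.List.sorted_eq_of_perm_of_pairwise_lt
  · unfold pvKeysA
    rw [List.perm_ext_iff_of_nodup
      (List.Nodup.filter _ (PySem.List.nodup_pyRange_one 1 255))
      (pv_nodup_cand g _ (PySem.Set.nodup_ofList _))]
    intro k
    rw [pv_mem_cand, List.mem_filter, PySem.Set.mem_ofList, pv_allPrintable_iff]
  · exact List.Pairwise.filter _ (PySem.List.pairwise_lt_pyRange_one 1 255)

-- B's dict built by setdefault-append holds exactly the per-column lists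
theorem pv_cols_getD (keyLength i : Int) (cipher : List Int) :
    ((PySem.List.enumerate cipher 0).foldl
      (fun d jb => d.modify (PySem.Int.mod jb.1 keyLength) [] (fun g => g ++ [jb.2]))
      (PySem.Dict.empty : PySem.Dict Int (List Int))).getD i []
    = pvCol keyLength cipher 0 i := by
  rw [show (List.foldl (fun d jb => PySem.Dict.modify d (PySem.Int.mod jb.1 keyLength) []
        (fun g => g ++ [jb.2])) PySem.Dict.empty (PySem.List.enumerate cipher 0))
      = (List.foldl (fun d p => PySem.Dict.modify d p.1 [] (fun g => g ++ [p.2]))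
          PySem.Dict.empty ((PySem.List.enumerate cipher 0).map
            (fun jb => (PySem.Int.mod jb.1 keyLength, jb.2)))) from by rw [List.foldl_map]]
  rw [PySem.Dict.getD_foldl_modify_append]
  simp [pvCol, List.filter_map, Function.comp_def]

-- A's grouping pass equals B's per-column lists
theorem pv_group_eq (keyLength : Int) (hkl : 1 ≤ keyLength) (cipher : List Int) :
    getCipherGroup keyLength cipher
      = (PySem.List.pyRange 0 keyLength 1).map (fun i => pvCol keyLength cipher 0 i) := by
  have hinit : ((PySem.List.pyRange 0 keyLength 1).map (fun _ => ([] : List Int)))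
      = List.replicate keyLength.toNat [] := by
    rw [List.map_const']
    simp [PySem.List.length_pyRange_one]
  have hlen : (getCipherGroup keyLength cipher).length = keyLength.toNat := by
    rw [getCipherGroup, pv_loop_length, hinit, List.length_replicate]
  apply List.ext_getElem
  · simp [hlen, PySem.List.length_pyRange_one]
  · intro j hj hj2
    have hjlt : j < keyLength.toNat := by simpa [hlen] using hj
    have h := pv_loop_getD keyLength hkl cipher 0 le_rfl
      (List.replicate keyLength.toNat []) (by simp) j (by simp [hjlt])
    have h' : (getCipherGroup keyLength cipher).getD j [] = pvCol keyLength cipher 0 (j : Int) := by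
      unfold getCipherGroup
      rw [hinit]
      simpa using h
    rw [← List.getD_eq_getElem _ [] hj, h']
    have hr : j < (PySem.List.pyRange 0 keyLength 1).length := by
      simpa [PySem.List.length_pyRange_one] using hjlt
    rw [List.getElem_map]
    rw [PySem.List.getElem_pyRange_one]
    norm_num

-- ===== VERDICT (by name: the statement is the Claim_ definition above) =====
theorem getKeyRange_spec : Claim_equal_getKeyRange := by
  intro keyLength cipher _ hpre
  unfold Spec_getKeyRange getKeyRange getKeyRange_alt
  by_cases hkl : 1 ≤ keyLength
  · have houter := pv_outer_eq (getCipherGroup keyLength cipher) []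
    have hinit : ((PySem.List.pyRange 0 keyLength 1).map (fun _ => ([] : List Int)))
        = List.replicate (getCipherGroup keyLength cipher).length [] := by
      rw [List.map_const']
      congr 1
      rw [pv_group_eq keyLength hkl cipher]
      simp [PySem.List.length_pyRange_one]
    simp only [List.nil_append, List.length_nil, Int.natCast_zero] at houter
    rw [hinit, houter, pv_group_eq keyLength hkl cipher, List.map_map,
      PySem.List.foldl_append_singleton_eq_map, List.nil_append]
    apply List.map_congr_left
    intro i _
    simp only [Function.comp]
    rw [pv_cols_getD keyLength i cipher]
    exact (pv_column_eq (pvCol keyLength cipher 0 i)).symm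
  · -- keyLength ≤ 0: Pre_ forces cipher = []; both sides are []
    have hc : cipher = [] := by
      rcases hpre with h | h
      · exact absurd h hkl
      · exact h
    have hr : PySem.List.pyRange 0 keyLength 1 = [] :=
      PySem.List.pyRange_one_eq_nil (by omega)
    subst hc
    simp [getCipherGroup, getCipherGroupLoop, hr]
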